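-- pv_equiv track=rewrite | github.com/serene4mr/mowbot-gui | src/core/docker_controller.py | _worst_status
-- ===== SOURCE A (Python) =====
-- from typing import Any, Dict, Iterable, List, Mapping, Optional
--
-- _STATUS_PRIORITY = ["error", "missing", "exited", "created", "running"]
--
-- def _worst_status(statuses: Iterable[str]) -> str:
--     """Return the most severe status from a collection (lower index = worse)."""
--     worst_idx = len(_STATUS_PRIORITY)
--     worst = "unknown"
--     for s in statuses:
--         try:
--             idx = _STATUS_PRIORITY.index(s)
--         except ValueError:
--             idx = len(_STATUS_PRIORITY) - 1
--         if idx < worst_idx: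
--             worst_idx = idx
--             worst = s
--     return worst
-- ===== SOURCE B (Python) =====
-- _STATUS_PRIORITY = ["error", "missing", "exited", "created", "running"]
--
-- def _worst_status(statuses):
--     """Return the most severe status: scan severity levels best-to-worst-priority
--     and return the first status found at the current level."""
--     xs = list(statuses)
--     n = len(_STATUS_PRIORITY)
--     for level in range(n):
--         for s in xs:
--             idx = _STATUS_PRIORITY.index(s) if s in _STATUS_PRIORITY else n - 1
--             if idx == level:
--                 return s
--     return "unknown"
-- ===== Notes on version B (the rewrite author's own statement) =====
-- stated objective: alternative
-- what changed: Replaces A's single-pass running-minimum fold with a priority-ordered nested traversal: loop over severity levels 0..4 and return the first status whose priority index equals the current level.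
import Mathlib
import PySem

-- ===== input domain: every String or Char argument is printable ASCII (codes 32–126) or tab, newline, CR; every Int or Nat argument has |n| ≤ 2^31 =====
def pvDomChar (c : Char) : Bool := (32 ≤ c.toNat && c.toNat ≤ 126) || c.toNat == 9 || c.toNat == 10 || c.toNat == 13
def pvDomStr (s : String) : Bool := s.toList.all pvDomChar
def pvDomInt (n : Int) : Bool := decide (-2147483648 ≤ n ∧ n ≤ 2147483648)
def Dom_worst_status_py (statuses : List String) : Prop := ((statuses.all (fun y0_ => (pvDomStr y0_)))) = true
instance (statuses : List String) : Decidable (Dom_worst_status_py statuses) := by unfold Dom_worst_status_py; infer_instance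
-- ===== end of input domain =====

-- B replaces A's running-minimum fold with a priority-ordered nested traversal (alternative decomposition, same result).

def pvPrio : List String := ["error", "missing", "exited", "created", "running"]

-- ===== PORT A =====
-- A's per-element index: try _STATUS_PRIORITY.index(s) except ValueError -> len-1
def pvIdxA (s : String) : Int :=
  match PySem.List.index? pvPrio s with
  | some i => (i : Int)
  | none => (pvPrio.length : Int) - 1

def pvWorstStep (st : Int × String) (s : String) : Int × String :=
  let idx := pvIdxA s
  if idx < st.1 then (idx, s) else st

def worst_status_py (statuses : List String) : String :=
  (statuses.foldl pvWorstStep ((pvPrio.length : Int), "unknown")).2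

-- ===== PORT B =====
-- B's per-element index: conditional expression on membership
def pvIdxB (s : String) : Int :=
  if s ∈ pvPrio then (((PySem.List.index? pvPrio s).getD 0 : Nat) : Int)
  else (pvPrio.length : Int) - 1

-- inner loop: first status at the given severity level
def pvScan (level : Int) : List String → Option String
  | [] => none
  | s :: t => if pvIdxB s = level then some s else pvScan level t

-- outer loop over the remaining levels
def pvLevels (statuses : List String) : List Int → String
  | [] => "unknown"
  | l :: ls =>
    match pvScan l statuses with
    | some s => s
    | none => pvLevels statuses ls

def worst_status_py_alt (statuses : List String) : String :=
  pvLevels statuses (PySem.List.pyRange 0 (pvPrio.length : Int) 1)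

-- ===== PRECONDITION & SPEC =====
def Spec_worst_status_py (statuses : List String) (out : String) : Prop := out = worst_status_py_alt statuses
instance (statuses : List String) (out : String) : Decidable (Spec_worst_status_py statuses out) := by unfold Spec_worst_status_py; infer_instance

-- ===== CLAIM (what is proved, stated in full; the proofs are below) =====
def Claim_equal_worst_status_py : Prop := ∀ (statuses : List String), Dom_worst_status_py statuses → Spec_worst_status_py statuses (worst_status_py statuses)

-- ===== LEMMAS AND PROOFS =====

-- minimum priority index over the list (5 if empty)
def pvMin (xs : List String) : Int := xs.foldr (fun s m => min (pvIdxA s) m) 5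

-- first element achieving priority index k
def pvFirstWith (k : Int) : List String → String
  | [] => "unknown"
  | s :: t => if pvIdxA s = k then s else pvFirstWith k t

theorem pvIdxA_bounds (s : String) : 0 ≤ pvIdxA s ∧ pvIdxA s ≤ 4 := by
  unfold pvIdxA
  cases h : PySem.List.index? pvPrio s with
  | none => simp [pvPrio]
  | some i =>
    rw [PySem.List.index?_eq_some_iff] at h
    obtain ⟨pre, suf, hxs, hlen, -⟩ := h
    have : pvPrio.length = pre.length + 1 + suf.length := by
      rw [hxs]; simp; omega
    simp only []
    have h5 : pvPrio.length = 5 := by simp [pvPrio]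
    omega

theorem pvIdxB_eq (s : String) : pvIdxB s = pvIdxA s := by
  unfold pvIdxB pvIdxA
  by_cases hm : s ∈ pvPrio
  · have := (PySem.List.index?_isSome_iff pvPrio s).mpr hm
    cases h : PySem.List.index? pvPrio s with
    | none => rw [h] at this; simp at this
    | some i => simp [hm]
  · rw [if_neg hm, (PySem.List.index?_eq_none_iff pvPrio s).mpr hm]

theorem pvMin_le5 (xs : List String) : pvMin xs ≤ 5 := by
  induction xs with
  | nil => simp [pvMin]
  | cons s t ih => simp [pvMin] at *; omega

theorem pvMin_nonneg (xs : List String) : 0 ≤ pvMin xs := by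
  induction xs with
  | nil => simp [pvMin]
  | cons s t ih =>
    have := (pvIdxA_bounds s).1
    simp [pvMin] at *; exact ⟨this, ih⟩

-- A's fold characterised by pvMin / pvFirstWith
theorem foldA_char (xs : List String) : ∀ (widx : Int) (w : String), widx ≤ 5 →
    (xs.foldl pvWorstStep (widx, w)).2 =
      if pvMin xs < widx then pvFirstWith (pvMin xs) xs else w := by
  induction xs with
  | nil => intro widx w h; simp [pvMin]; omega
  | cons s t ih =>
    intro widx w h
    have hb := pvIdxA_bounds s
    have hmt5 := pvMin_le5 t
    have hmin : pvMin (s :: t) = min (pvIdxA s) (pvMin t) := by simp [pvMin]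
    simp only [List.foldl_cons, pvWorstStep]
    by_cases hlt : pvIdxA s < widx
    · rw [if_pos hlt]
      rw [ih (pvIdxA s) s (by omega)]
      by_cases hc : pvMin t < pvIdxA s
      · have h1 : pvMin (s :: t) = pvMin t := by omega
        have h2 : pvIdxA s ≠ pvMin t := by omega
        rw [h1]
        simp [hc, pvFirstWith, h2]
        omega
      · have h1 : pvMin (s :: t) = pvIdxA s := by omega
        rw [h1]
        simp [hc, pvFirstWith]
        omega
    · rw [if_neg hlt]
      rw [ih widx w h]
      by_cases hc : pvMin t < widx
      · have h1 : pvMin (s :: t) = pvMin t := by omega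
        have h2 : pvIdxA s ≠ pvMin t := by omega
        rw [h1]
        simp [hc, pvFirstWith, h2]
      · have : ¬ pvMin (s :: t) < widx := by omega
        simp [hc, this]

theorem scan_none (xs : List String) (l : Int) (h : l < pvMin xs) : pvScan l xs = none := by
  induction xs with
  | nil => simp [pvScan]
  | cons s t ih =>
    have hmin : pvMin (s :: t) = min (pvIdxA s) (pvMin t) := by simp [pvMin]
    rw [hmin] at h
    have hne : pvIdxB s ≠ l := by rw [pvIdxB_eq]; omega
    simp [pvScan, hne]
    exact ih (by omega)

theorem scan_min (xs : List String) (h : pvMin xs < 5) :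
    pvScan (pvMin xs) xs = some (pvFirstWith (pvMin xs) xs) := by
  induction xs with
  | nil => simp [pvMin] at h
  | cons s t ih =>
    have hb := pvIdxA_bounds s
    have hmt5 := pvMin_le5 t
    have hmin : pvMin (s :: t) = min (pvIdxA s) (pvMin t) := by simp [pvMin]
    by_cases hc : pvMin t < pvIdxA s
    · have h1 : pvMin (s :: t) = pvMin t := by omega
      have h2 : pvIdxA s ≠ pvMin t := by omega
      have hne : pvIdxB s ≠ pvMin (s :: t) := by rw [pvIdxB_eq, h1]; omega
      rw [h1] at *
      simp [pvScan, hne, pvFirstWith, h2]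
      exact ih (by omega)
    · have h1 : pvMin (s :: t) = pvIdxA s := by omega
      have heq : pvIdxB s = pvMin (s :: t) := by rw [pvIdxB_eq, h1]
      rw [h1] at *
      simp [pvScan, heq, pvFirstWith]

theorem levels_char (xs : List String) : ∀ (n : Nat) (level : Int), level + n = 5 → level ≤ pvMin xs →
    pvLevels xs (PySem.List.pyRange level 5 1) =
      if pvMin xs < 5 then pvFirstWith (pvMin xs) xs else "unknown" := by
  intro n
  induction n with
  | zero =>
    intro level h5 hle
    have := pvMin_le5 xs
    have hm5 : pvMin xs = 5 := by omega
    rw [PySem.List.pyRange_one_eq_nil (by omega)]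
    simp [pvLevels, hm5]
  | succ n ih =>
    intro level h5 hle
    rw [PySem.List.pyRange_one_cons (by omega)]
    simp only [pvLevels]
    by_cases hlt : level < pvMin xs
    · rw [scan_none xs level hlt]
      exact ih (level + 1) (by omega) (by omega)
    · have heq : level = pvMin xs := by omega
      have hm5 : pvMin xs < 5 := by omega
      rw [heq, scan_min xs hm5]
      simp [hm5]

-- ===== VERDICT (by name: the statement is the Claim_ definition above) =====
theorem worst_status_py_spec : Claim_equal_worst_status_py := by
  intro xs _
  unfold Spec_worst_status_py worst_status_py worst_status_py_alt
  have h5 : (pvPrio.length : Int) = 5 := by simp [pvPrio]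
  rw [h5, foldA_char xs 5 "unknown" (by omega),
      levels_char xs 5 0 (by omega) (pvMin_nonneg xs)]
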